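-- pv_equiv track=rewrite | github.com/Mmaarten23/aoc | 2021/day13.py | applyHorizontalFold
-- ===== SOURCE A (Python) =====
-- def applyHorizontalFold(board, nr):
--     original = board[:nr]
--     folded = board[nr + 1:]
--     new_board = []
--     end_i = min(len(original), len(folded))
--     for i in range(0, end_i):
--         a = original[-(i + 1)]
--         b = folded[i]
--         new_board.insert(0, [a[j] * b[j] for j in range(0, len(a))])
--     if len(folded) > len(original):
--         for i in range(end_i, len(folded)):
--             new_board.insert(0, folded[i])
--     else:
--         for i in range(end_i, len(original)):
--             new_board.insert(0, original[-(i + 1)])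
--     return new_board
-- ===== SOURCE B (Python) =====
-- def applyHorizontalFold(board, nr):
--     top = board[:nr]
--     bottom = board[nr + 1:]
--     L = max(len(top), len(bottom))
--     out = []
--     for j in range(L):
--         d = L - 1 - j
--         ti = len(top) - 1 - d
--         has_t = ti >= 0
--         has_b = d < len(bottom)
--         if has_t and has_b:
--             t = top[ti]
--             b = bottom[d]
--             out.append([t[k] * b[k] for k in range(len(t))])
--         elif has_t:
--             out.append(top[ti])
--         else:
--             out.append(bottom[d])
--     return out
-- ===== Notes on version B (the rewrite author's own statement) =====
-- stated objective: simpler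
-- what changed: A builds the result with three loops that insert each row at the front (overlap products, then the leftover rows of the longer half); B makes one bounds-checked pass over the output positions in final order, appending either the elementwise product or the single surviving row.
import Mathlib
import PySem

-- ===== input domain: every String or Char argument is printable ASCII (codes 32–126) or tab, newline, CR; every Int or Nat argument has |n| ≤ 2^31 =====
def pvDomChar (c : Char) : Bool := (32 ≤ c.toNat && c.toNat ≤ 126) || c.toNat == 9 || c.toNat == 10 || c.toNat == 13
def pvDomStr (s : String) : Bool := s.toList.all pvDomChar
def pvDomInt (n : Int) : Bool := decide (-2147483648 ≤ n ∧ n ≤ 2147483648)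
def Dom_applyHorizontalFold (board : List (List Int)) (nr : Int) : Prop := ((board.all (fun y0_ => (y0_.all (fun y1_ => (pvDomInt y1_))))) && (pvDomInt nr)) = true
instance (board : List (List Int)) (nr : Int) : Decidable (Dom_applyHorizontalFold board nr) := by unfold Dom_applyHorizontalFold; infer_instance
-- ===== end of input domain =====

-- B replaces A's two cons-at-front loops (overlap products, then leftover rows) with a single
-- bounds-checked pass over output positions, appending rows in final order (objective: simpler
-- decomposition, same asymptotic cost).

-- ===== PORT A =====
def applyHorizontalFold (board : List (List Int)) (nr : Int) : List (List Int) :=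
  let original := PySem.List.slice board none (some nr)
  let folded := PySem.List.slice board (some (nr+1)) none
  let end_i := min (PySem.List.len original) (PySem.List.len folded)
  let new_board : List (List Int) := []
  let new_board := (PySem.List.pyRange 0 end_i 1).foldl (fun nb i =>
      let a := PySem.List.pyGetD original (-(i+1)) []
      let b := PySem.List.pyGetD folded i []
      ((PySem.List.pyRange 0 (PySem.List.len a) 1).map (fun j =>
        (PySem.List.pyGetD a j 0) * (PySem.List.pyGetD b j 0))) :: nb) new_board
  if PySem.List.len folded > PySem.List.len original then
    (PySem.List.pyRange end_i (PySem.List.len folded) 1).foldl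
      (fun nb i => PySem.List.pyGetD folded i [] :: nb) new_board
  else
    (PySem.List.pyRange end_i (PySem.List.len original) 1).foldl
      (fun nb i => PySem.List.pyGetD original (-(i+1)) [] :: nb) new_board

-- ===== PORT B =====
def applyHorizontalFold_alt (board : List (List Int)) (nr : Int) : List (List Int) :=
  let top := PySem.List.slice board none (some nr)
  let bottom := PySem.List.slice board (some (nr+1)) none
  let L := max (PySem.List.len top) (PySem.List.len bottom)
  (PySem.List.pyRange 0 L 1).foldl (fun out j =>
    let d := L - 1 - j
    let ti := PySem.List.len top - 1 - d
    let hasT := ti ≥ 0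
    let hasB := d < PySem.List.len bottom
    if hasT ∧ hasB then
      let t := PySem.List.pyGetD top ti []
      let b := PySem.List.pyGetD bottom d []
      out ++ [(PySem.List.pyRange 0 (PySem.List.len t) 1).map (fun k =>
        (PySem.List.pyGetD t k 0) * (PySem.List.pyGetD b k 0))]
    else if hasT then
      out ++ [PySem.List.pyGetD top ti []]
    else
      out ++ [PySem.List.pyGetD bottom d []]) []

-- ===== PRECONDITION & SPEC =====
-- Pre_ excludes exactly the inputs on which the Python A raises IndexError: some overlapping
-- pair of rows whose top row is longer than the bottom row it is folded onto.
def Pre_applyHorizontalFold (board : List (List Int)) (nr : Int) : Prop :=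
  let top := PySem.List.slice board none (some nr)
  let bottom := PySem.List.slice board (some (nr+1)) none
  ∀ i : Nat, i < min top.length bottom.length →
    (top.getD (top.length - 1 - i) []).length ≤ (bottom.getD i []).length
instance (board : List (List Int)) (nr : Int) : Decidable (Pre_applyHorizontalFold board nr) := by
  unfold Pre_applyHorizontalFold; infer_instance

def pvWitness_applyHorizontalFold : List (List Int) × Int := ([[1, 2], [3, 4], [5, 6]], 1)

def Spec_applyHorizontalFold (board : List (List Int)) (nr : Int) (out : List (List Int)) : Prop := out = applyHorizontalFold_alt board nr
instance (board : List (List Int)) (nr : Int) (out : List (List Int)) : Decidable (Spec_applyHorizontalFold board nr out) := by unfold Spec_applyHorizontalFold; infer_instance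

-- ===== CLAIM (what is proved, stated in full; the proofs are below) =====
def Claim_equal_applyHorizontalFold : Prop := ∀ (board : List (List Int)) (nr : Int), Dom_applyHorizontalFold board nr → Pre_applyHorizontalFold board nr → Spec_applyHorizontalFold board nr (applyHorizontalFold board nr)

-- ===== LEMMAS AND PROOFS =====

-- elementwise product of two rows, over the indices of the first (as both Pythons compute it)
def prodRow (t b : List Int) : List Int :=
  (PySem.List.pyRange 0 (PySem.List.len t) 1).map
    (fun k => (PySem.List.pyGetD t k 0) * (PySem.List.pyGetD b k 0))

-- the row A builds at overlap index i
def rowProd (tp bt : List (List Int)) (i : Int) : List Int :=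
  prodRow (PySem.List.pyGetD tp (-(i+1)) []) (PySem.List.pyGetD bt i [])

lemma foldl_cons_rev {α β : Type} (g : α → β) (r : List α) :
    ∀ (init : List β), r.foldl (fun nb i => g i :: nb) init = (r.map g).reverse ++ init := by
  induction r with
  | nil => intro init; simp
  | cons a r ih => intro init; simp [List.foldl_cons, ih]

lemma foldl_ite3_append {β : Type} (C1 C2 : Int → Prop) [DecidablePred C1] [DecidablePred C2]
    (P Q R : Int → β) (r : List Int) :
    ∀ (init : List β),
      r.foldl (fun out j => if C1 j then out ++ [P j] else if C2 j then out ++ [Q j] else out ++ [R j]) init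
        = init ++ r.map (fun j => if C1 j then P j else if C2 j then Q j else R j) := by
  induction r with
  | nil => intro init; simp
  | cons a r ih =>
      intro init
      simp only [List.foldl_cons, List.map_cons]
      rw [ih]
      split_ifs <;> simp

lemma reverse_map_pyRange {β : Type} (g : Int → β) (a b a' b' : Int) (hab : a ≤ b)
    (hlen : b - a = b' - a') :
    ((PySem.List.pyRange a b 1).map g).reverse
      = (PySem.List.pyRange a' b' 1).map (fun j => g (a + b' - 1 - j)) := by
  apply List.ext_getElem
  · simp [PySem.List.length_pyRange_one]; omega
  · intro k h1 h2
    simp only [List.getElem_reverse, List.getElem_map, List.length_map,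
      PySem.List.length_pyRange_one, PySem.List.getElem_pyRange_one]
    congr 1
    have hk : k < (b - a).toNat := by
      simpa [PySem.List.length_pyRange_one] using h1
    omega

lemma pyGetD_neg_succ {α : Type} (xs : List α) (d : Int) (c : α) (h0 : 0 ≤ d)
    (h1 : d < (xs.length : Int)) :
    PySem.List.pyGetD xs (-(d+1)) c = PySem.List.pyGetD xs ((xs.length : Int) - 1 - d) c := by
  have hd : -(d+1) = -((d.toNat + 1 : Nat) : Int) := by push_cast; omega
  rw [hd, PySem.List.pyGetD_neg_natCast xs (d.toNat + 1) c (by omega) (by omega)]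
  have h2 : ((xs.length : Int) - 1 - d) = ((xs.length - 1 - d.toNat : Nat) : Int) := by omega
  rw [h2, PySem.List.pyGetD_natCast]
  rw [List.getD_eq_getElem xs c (by omega)]
  have h3 : xs.length - (d.toNat + 1) = xs.length - 1 - d.toNat := by omega
  simp only [h3]

lemma core_eq (tp bt : List (List Int)) :
    (if PySem.List.len bt > PySem.List.len tp then
      (PySem.List.pyRange (min (PySem.List.len tp) (PySem.List.len bt)) (PySem.List.len bt) 1).foldl
        (fun nb i => PySem.List.pyGetD bt i [] :: nb)
        ((PySem.List.pyRange 0 (min (PySem.List.len tp) (PySem.List.len bt)) 1).foldl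
          (fun nb i => rowProd tp bt i :: nb) [])
    else
      (PySem.List.pyRange (min (PySem.List.len tp) (PySem.List.len bt)) (PySem.List.len tp) 1).foldl
        (fun nb i => PySem.List.pyGetD tp (-(i+1)) [] :: nb)
        ((PySem.List.pyRange 0 (min (PySem.List.len tp) (PySem.List.len bt)) 1).foldl
          (fun nb i => rowProd tp bt i :: nb) []))
    =
    (PySem.List.pyRange 0 (max (PySem.List.len tp) (PySem.List.len bt)) 1).foldl
      (fun out j =>
        if (PySem.List.len tp - 1 - (max (PySem.List.len tp) (PySem.List.len bt) - 1 - j) ≥ 0) ∧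
            (max (PySem.List.len tp) (PySem.List.len bt) - 1 - j < PySem.List.len bt) then
          out ++ [prodRow
            (PySem.List.pyGetD tp (PySem.List.len tp - 1 - (max (PySem.List.len tp) (PySem.List.len bt) - 1 - j)) [])
            (PySem.List.pyGetD bt (max (PySem.List.len tp) (PySem.List.len bt) - 1 - j) [])]
        else if PySem.List.len tp - 1 - (max (PySem.List.len tp) (PySem.List.len bt) - 1 - j) ≥ 0 then
          out ++ [PySem.List.pyGetD tp (PySem.List.len tp - 1 - (max (PySem.List.len tp) (PySem.List.len bt) - 1 - j)) []]
        else
          out ++ [PySem.List.pyGetD bt (max (PySem.List.len tp) (PySem.List.len bt) - 1 - j) []]) [] := by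
  simp only [PySem.List.len_eq, gt_iff_lt]
  by_cases hlt : (tp.length : Int) < (bt.length : Int)
  · rw [if_pos hlt, min_eq_left hlt.le, max_eq_right hlt.le]
    rw [foldl_cons_rev (fun i => PySem.List.pyGetD bt i ([] : List Int)),
        foldl_cons_rev (rowProd tp bt), List.append_nil,
        foldl_ite3_append, List.nil_append]
    rw [PySem.List.pyRange_one_append 0 ((bt.length : Int) - (tp.length : Int)) (bt.length : Int)
        (by omega) (by omega), List.map_append]
    rw [reverse_map_pyRange (fun i => PySem.List.pyGetD bt i ([] : List Int))
        (tp.length : Int) (bt.length : Int) 0 ((bt.length : Int) - (tp.length : Int)) hlt.le (by ring)]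
    rw [reverse_map_pyRange (rowProd tp bt) 0 (tp.length : Int)
        ((bt.length : Int) - (tp.length : Int)) (bt.length : Int) (by omega) (by ring)]
    congr 1
    · apply List.map_congr_left
      intro j hj
      rw [PySem.List.mem_pyRange_one] at hj
      beta_reduce
      rw [if_neg (by omega), if_neg (by omega)]
      have e1 : ((tp.length : Int) + ((bt.length : Int) - (tp.length : Int)) - 1 - j)
          = (bt.length : Int) - 1 - j := by ring
      rw [e1]
    · apply List.map_congr_left
      intro j hj
      rw [PySem.List.mem_pyRange_one] at hj
      beta_reduce
      rw [if_pos ⟨by omega, by omega⟩]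
      have e2 : ((0 : Int) + (bt.length : Int) - 1 - j) = (bt.length : Int) - 1 - j := by ring
      rw [e2, rowProd, pyGetD_neg_succ tp ((bt.length : Int) - 1 - j) [] (by omega) (by omega)]
  · rw [if_neg hlt, min_eq_right (by omega), max_eq_left (by omega)]
    rw [foldl_cons_rev (fun i => PySem.List.pyGetD tp (-(i+1)) ([] : List Int)),
        foldl_cons_rev (rowProd tp bt), List.append_nil,
        foldl_ite3_append, List.nil_append]
    rw [PySem.List.pyRange_one_append 0 ((tp.length : Int) - (bt.length : Int)) (tp.length : Int)
        (by omega) (by omega), List.map_append]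
    rw [reverse_map_pyRange (fun i => PySem.List.pyGetD tp (-(i+1)) ([] : List Int))
        (bt.length : Int) (tp.length : Int) 0 ((tp.length : Int) - (bt.length : Int)) (by omega) (by ring)]
    rw [reverse_map_pyRange (rowProd tp bt) 0 (bt.length : Int)
        ((tp.length : Int) - (bt.length : Int)) (tp.length : Int) (by omega) (by ring)]
    congr 1
    · apply List.map_congr_left
      intro j hj
      rw [PySem.List.mem_pyRange_one] at hj
      beta_reduce
      rw [if_neg (by omega), if_pos (by omega)]
      have e1 : ((bt.length : Int) + ((tp.length : Int) - (bt.length : Int)) - 1 - j)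
          = (tp.length : Int) - 1 - j := by ring
      rw [e1, pyGetD_neg_succ tp ((tp.length : Int) - 1 - j) [] (by omega) (by omega)]
    · apply List.map_congr_left
      intro j hj
      rw [PySem.List.mem_pyRange_one] at hj
      beta_reduce
      rw [if_pos ⟨by omega, by omega⟩]
      have e2 : ((0 : Int) + (tp.length : Int) - 1 - j) = (tp.length : Int) - 1 - j := by ring
      rw [e2, rowProd, pyGetD_neg_succ tp ((tp.length : Int) - 1 - j) [] (by omega) (by omega)]

-- ===== VERDICT (by name: the statement is the Claim_ definition above) =====
theorem applyHorizontalFold_spec : Claim_equal_applyHorizontalFold := by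
  intro board nr _ _
  exact core_eq (PySem.List.slice board none (some nr)) (PySem.List.slice board (some (nr+1)) none)
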